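-- pv_equiv track=rewrite | github.com/posl/comment_recommendation | script/split_gen/3_time/zh/113_D/6.py | amidakuji
-- ===== SOURCE A (Python) =====
-- def amidakuji(H,W,K):
--     ans = 0
--     for i in range(1<<W-1):
--         b = bin(i)[2:].zfill(W-1)
--         flag = True
--         for j in range(W-2):
--             if b[j] == '1' and b[j+1] == '1':
--                 flag = False
--         if flag == False:
--             continue
--         for j in range(W):
--             if j == 0:
--                 now = j
--             elif b[j-1] == '1':
--                 now += 1
--             elif b[j-1] == '0':
--                 now -= 1
--         if now == K-1:
--             ans += 1
--     return ans
-- ===== SOURCE B (Python) =====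
-- def amidakuji(H, W, K):
--     # closed form: answer = C(W-k, k) where k = (W+K-2)/2 is the required number of
--     # horizontal bars in a no-adjacent-ones row of width W-1
--     t = W + K - 2
--     if t < 0 or t % 2 != 0:
--         return 0
--     k = t // 2
--     m = W - k
--     if k > m:
--         return 0
--     c = 1
--     for i in range(k):
--         c = c * (m - i) // (i + 1)
--     return c
-- ===== Notes on version B (the rewrite author's own statement) =====
-- stated objective: alternative
-- what changed: A enumerates all 2^(W-1) row configurations and simulates each; B uses the closed form: the answer is the number of length-(W-1) no-adjacent-ones bitstrings with exactly k=(W+K-2)/2 ones, i.e. C(W-k,k), computed by one short multiplicative loop (intended as faster, O(W) vs O(2^W*W); a timing run could not measure a ratio because A times out on larger W).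
-- crash fix: For W <= 0 A raises ValueError (negative shift count in 1<<(W-1)); B returns the closed-form count, which is 0 at the witness. — e.g. on amidakuji(0, 0, 0): A raises ValueError, B returns 0
import Mathlib
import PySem

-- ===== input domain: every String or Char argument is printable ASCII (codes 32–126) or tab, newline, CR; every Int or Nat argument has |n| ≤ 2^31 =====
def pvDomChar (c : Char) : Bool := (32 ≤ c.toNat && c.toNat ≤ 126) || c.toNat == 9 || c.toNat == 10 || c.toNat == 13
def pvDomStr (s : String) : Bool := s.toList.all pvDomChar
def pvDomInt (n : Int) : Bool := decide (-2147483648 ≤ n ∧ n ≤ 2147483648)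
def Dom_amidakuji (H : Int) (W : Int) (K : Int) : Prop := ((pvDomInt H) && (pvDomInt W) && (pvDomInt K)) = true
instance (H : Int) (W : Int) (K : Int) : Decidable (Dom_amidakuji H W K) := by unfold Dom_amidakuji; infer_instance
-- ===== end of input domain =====

-- B replaces A's enumeration of all 2^(W-1) rows by the closed form C(W-k, k) with
-- k = (W+K-2)/2, computed by a short multiplicative loop (intended as faster; the timing
-- run could not measure a ratio because A times out on larger W).

-- ===== PORT A =====
-- bin(i)[2:] of a nonnegative integer: binary digits, most significant first, "0" for 0
def pyBin (i : Nat) : List Char :=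
  if h : i < 2 then [if i = 1 then '1' else '0']
  else pyBin (i / 2) ++ [if i % 2 = 1 then '1' else '0']
decreasing_by exact Nat.div_lt_self (by omega) (by omega)

-- str.zfill(n): pad with '0' on the left to length n
def zfill (s : List Char) (n : Nat) : List Char := List.replicate (n - s.length) '0' ++ s

-- literal port of A; b[...] indices are always in range where A reaches them, so the
-- raising indexing is ported as pyGetD with an unused default; for W ≤ 0 Python's
-- 1 << (W-1) raises (excluded by Pre_), here (W-1).toNat clamps to 0.
def amidakuji (H : Int) (W : Int) (K : Int) : Int :=
  (PySem.List.pyRange 0 ((2 : Int) ^ (W - 1).toNat) 1).foldl (fun ans i =>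
    let b := zfill (pyBin i.toNat) (W - 1).toNat
    let flag := (PySem.List.pyRange 0 (W - 2) 1).foldl
      (fun f j => if PySem.List.pyGetD b j '?' = '1' ∧ PySem.List.pyGetD b (j + 1) '?' = '1'
                  then false else f) true
    if flag = false then ans
    else
      let now := (PySem.List.pyRange 0 W 1).foldl
        (fun now j =>
          if j = 0 then 0
          else if PySem.List.pyGetD b (j - 1) '?' = '1' then now + 1
          else if PySem.List.pyGetD b (j - 1) '?' = '0' then now - 1
          else now) 0
      if now = K - 1 then ans + 1 else ans) 0

-- ===== PORT B =====
def amidakuji_alt (H : Int) (W : Int) (K : Int) : Int :=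
  let t := W + K - 2
  if t < 0 ∨ PySem.Int.mod t 2 ≠ 0 then 0
  else
    let k := PySem.Int.floordiv t 2
    let m := W - k
    if k > m then 0
    else (PySem.List.pyRange 0 k 1).foldl
      (fun c i => PySem.Int.floordiv (c * (m - i)) (i + 1)) 1

-- ===== PRECONDITION & SPEC =====
-- A raises ValueError (negative shift count) for W ≤ 0; those inputs are excluded.
def Pre_amidakuji (H : Int) (W : Int) (K : Int) : Prop := 1 ≤ W
instance (H : Int) (W : Int) (K : Int) : Decidable (Pre_amidakuji H W K) := by
  unfold Pre_amidakuji; infer_instance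

def pvWitness_amidakuji : Int × Int × Int := (1, 3, 1)

-- For W ≤ 0 A raises ValueError (negative shift count in 1 << (W-1)); B returns the closed-form count.
def Raises_amidakuji (H : Int) (W : Int) (K : Int) : Prop := W ≤ 0
instance (H : Int) (W : Int) (K : Int) : Decidable (Raises_amidakuji H W K) := by
  unfold Raises_amidakuji; infer_instance
def pvRaiseWitness_amidakuji : Int × Int × Int := (0, 0, 0)
def pvRaiseWitnessOut_amidakuji : Int := 0

def Spec_amidakuji (H : Int) (W : Int) (K : Int) (out : Int) : Prop := out = amidakuji_alt H W K
instance (H : Int) (W : Int) (K : Int) (out : Int) : Decidable (Spec_amidakuji H W K out) := by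
  unfold Spec_amidakuji; infer_instance

-- ===== CLAIM (what is proved, stated in full; the proofs are below) =====
def Claim_equal_amidakuji : Prop := ∀ (H : Int) (W : Int) (K : Int),
  Dom_amidakuji H W K → Pre_amidakuji H W K → Spec_amidakuji H W K (amidakuji H W K)

def Claim_raises_amidakuji : Prop :=
  (∀ (H : Int) (W : Int) (K : Int), Dom_amidakuji H W K → Raises_amidakuji H W K → ¬ Pre_amidakuji H W K) ∧
  (Dom_amidakuji (pvRaiseWitness_amidakuji.1) (pvRaiseWitness_amidakuji.2.1) (pvRaiseWitness_amidakuji.2.2) ∧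
   Raises_amidakuji (pvRaiseWitness_amidakuji.1) (pvRaiseWitness_amidakuji.2.1) (pvRaiseWitness_amidakuji.2.2) ∧
   amidakuji_alt (pvRaiseWitness_amidakuji.1) (pvRaiseWitness_amidakuji.2.1) (pvRaiseWitness_amidakuji.2.2) = pvRaiseWitnessOut_amidakuji)

-- ===== LEMMAS AND PROOFS =====

-- proof-side vocabulary: no two adjacent '1' characters
def noAdj : List Char → Bool
  | [] => true
  | [_] => true
  | a :: b :: t => !(a = '1' && b = '1') && noAdj (b :: t)

-- all length-n strings over {'0','1'}, most significant character first
def strs : Nat → List (List Char)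
  | 0 => [[]]
  | n + 1 => (strs n).map ('0' :: ·) ++ (strs n).map ('1' :: ·)

-- counts of no-adjacent-ones strings (with a '1' prepended, for the recurrence)
def cnt (n k : Nat) : Nat := (strs n).countP (fun s => noAdj s && s.count '1' == k)
def dcnt (n k : Nat) : Nat := (strs n).countP (fun s => noAdj ('1' :: s) && s.count '1' + 1 == k)

theorem strs_sound : ∀ n, ∀ s ∈ strs n, s.length = n ∧ ∀ c ∈ s, c = '0' ∨ c = '1' := by
  intro n
  induction n with
  | zero => intro s hs; simp [strs] at hs; simp [hs]
  | succ n ih =>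
    intro s hs
    simp only [strs, List.mem_append, List.mem_map] at hs
    rcases hs with ⟨t, ht, rfl⟩ | ⟨t, ht, rfl⟩ <;>
      obtain ⟨hl, hc⟩ := ih t ht <;>
      refine ⟨by simp [hl], ?_⟩ <;> intro c hc' <;> simp at hc' <;>
      rcases hc' with rfl | h <;> simp_all


theorem noAdj_cons0 (s : List Char) : noAdj ('0' :: s) = noAdj s := by
  cases s with
  | nil => rfl
  | cons b t => simp [noAdj]

theorem noAdj_cons1 (s : List Char) : noAdj ('1' :: '0' :: s) = noAdj ('0' :: s) := by
  simp [noAdj]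

theorem cnt_succ (n k : Nat) : cnt (n + 1) k = cnt n k + dcnt n k := by
  simp only [cnt, dcnt, strs, List.countP_append, List.countP_map]
  congr 1
  · apply List.countP_congr
    intro s _
    simp only [Function.comp_apply, noAdj_cons0, List.count_cons]
    rfl
  · apply List.countP_congr
    intro s _
    simp only [Function.comp_apply, List.count_cons]
    rfl

theorem dcnt_zero (n : Nat) : dcnt n 0 = 0 := by
  simp only [dcnt]
  rw [List.countP_eq_zero]
  intro s _
  simp

theorem dcnt_succ (n k : Nat) : dcnt (n + 1) (k + 1) = cnt n k := by
  simp only [cnt, dcnt, strs, List.countP_append, List.countP_map]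
  have h1 : (strs n).countP ((fun s => noAdj ('1' :: s) && s.count '1' + 1 == k + 1) ∘ ('1' :: ·)) = 0 := by
    rw [List.countP_eq_zero]
    intro s _
    simp [noAdj]
  rw [h1, Nat.add_zero]
  apply List.countP_congr
  intro s _
  simp only [Function.comp_apply, noAdj_cons1, noAdj_cons0, List.count_cons]
  simp

theorem cnt_dcnt : ∀ n, (∀ k, cnt n k = Nat.choose (n + 1 - k) k) ∧
    (∀ k, dcnt n (k + 1) = Nat.choose (n - k) k) := by
  intro n
  induction n with
  | zero =>
    constructor
    · intro k
      match k with
      | 0 => decide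
      | 1 => decide
      | (k+2) =>
        have : cnt 0 (k+2) = 0 := by
          simp [cnt, strs, noAdj]
        rw [this, Nat.choose_eq_zero_of_lt (by omega)]
    · intro k
      match k with
      | 0 => decide
      | (k+1) =>
        have : dcnt 0 (k+2) = 0 := by simp [dcnt, strs]
        rw [this, Nat.choose_eq_zero_of_lt (by omega)]
  | succ n ih =>
    obtain ⟨ihc, ihd⟩ := ih
    constructor
    · intro k
      match k with
      | 0 => rw [cnt_succ, dcnt_zero, ihc 0]; simp
      | (k+1) =>
        rw [cnt_succ, ihc (k+1), ihd k]
        by_cases hk : k ≤ n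
        · rw [show n + 1 - (k+1) = n - k by omega, show n + 1 + 1 - (k + 1) = (n - k) + 1 by omega,
            Nat.choose_succ_succ]
          simp [Nat.succ_eq_add_one, Nat.add_comm]
        · rw [Nat.choose_eq_zero_of_lt (by omega), Nat.choose_eq_zero_of_lt (by omega),
            Nat.choose_eq_zero_of_lt (by omega)]
    · intro k
      rw [dcnt_succ, ihc k]

theorem cnt_closed : ∀ n k, cnt n k = Nat.choose (n + 1 - k) k := fun n => (cnt_dcnt n).1


theorem pyBin_len : ∀ n i : Nat, 1 ≤ n → i < 2 ^ n → (pyBin i).length ≤ n := by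
  intro n
  induction n with
  | zero => omega
  | succ n ih =>
    intro i _ hi
    by_cases h2 : i < 2
    · rw [pyBin, dif_pos h2]; simp
    · rw [pyBin, dif_neg h2]
      have hn : 1 ≤ n := by
        by_contra h
        have : n = 0 := by omega
        subst this; simp at hi; omega
      have := ih (i / 2) hn (by
        have : 2 ^ (n+1) = 2 * 2 ^ n := by ring
        omega)
      simp [List.length_append]
      omega

theorem zfill_len (s : List Char) (n : Nat) : (zfill s n).length = max n s.length := by
  simp [zfill]; omega

theorem pyBin_zero : pyBin 0 = ['0'] := by rw [pyBin]; rfl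
theorem pyBin_one : pyBin 1 = ['1'] := by rw [pyBin]; rfl

theorem zfill_of_le (s : List Char) (m : Nat) (h : m ≤ s.length) : zfill s m = s := by
  simp [zfill, Nat.sub_eq_zero_of_le h]

theorem zfill_step (n : Nat) (i : Nat) (hn : 1 ≤ n) (hi : i < 2 ^ n) :
    zfill (pyBin i) (n + 1) = '0' :: zfill (pyBin i) n := by
  have hl := pyBin_len n i hn hi
  simp only [zfill]
  rw [show n + 1 - (pyBin i).length = (n - (pyBin i).length) + 1 by omega, List.replicate_succ]
  rfl

theorem zfill_half : ∀ n j : Nat, 1 ≤ n → j < 2 ^ (n + 1) →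
    zfill (pyBin j) (n + 1) = zfill (pyBin (j / 2)) n ++ [if j % 2 = 1 then '1' else '0'] := by
  intro n j hn _
  by_cases h2 : j < 2
  · interval_cases j
    · show zfill (pyBin 0) (n+1) = zfill (pyBin 0) n ++ ['0']
      rw [pyBin, dif_pos (by omega)]
      simp only [zfill]
      simp only [List.length_cons, List.length_nil]
      rw [show n + 1 - 1 = n by omega, show (if (0:Nat) = 1 then '1' else '0') = '0' by simp]
      rw [show n = (n - 1) + 1 by omega, List.replicate_succ']
      simp
    · show zfill (pyBin 1) (n+1) = zfill (pyBin 0) n ++ ['1']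
      rw [pyBin, dif_pos (by omega), pyBin, dif_pos (by omega)]
      simp only [zfill, List.length_cons, List.length_nil]
      rw [show n + 1 - 1 = n by omega]
      rw [show (n:Nat) = (n - 1) + 1 by omega, List.replicate_succ']
      simp
  · conv_lhs => rw [pyBin, dif_neg h2]
    simp only [zfill, List.length_append, List.length_cons, List.length_nil]
    rw [show n + 1 - ((pyBin (j/2)).length + 1) = n - (pyBin (j/2)).length by omega]
    simp [List.append_assoc]

theorem pyBin_msb : ∀ n j : Nat, 1 ≤ n → j < 2 ^ n →
    pyBin (2 ^ n + j) = '1' :: zfill (pyBin j) n := by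
  intro n
  induction n with
  | zero => omega
  | succ n ih =>
    intro j _ hj
    by_cases hn : 1 ≤ n
    · have hpow : 2 ^ (n + 1) = 2 * 2 ^ n := by ring
      conv_lhs => rw [pyBin, dif_neg (by omega)]
      have hd : (2 ^ (n + 1) + j) / 2 = 2 ^ n + j / 2 := by omega
      have hm : (2 ^ (n + 1) + j) % 2 = j % 2 := by omega
      rw [hd, hm, ih (j / 2) hn (by omega)]
      rw [zfill_half n j hn hj]
      rfl
    · have : n = 0 := by omega
      subst this
      interval_cases j
      · rw [show 2^1 + 0 = 2 by norm_num, pyBin, dif_neg (by omega)]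
        norm_num [pyBin_one, pyBin_zero, zfill]
      · rw [show 2^1 + 1 = 3 by norm_num, pyBin, dif_neg (by omega)]
        norm_num [pyBin_one, zfill]

theorem map_zfill_pyBin : ∀ n, 1 ≤ n →
    (List.range (2 ^ n)).map (fun i => zfill (pyBin i) n) = strs n := by
  intro n
  induction n with
  | zero => omega
  | succ n ih =>
    intro _
    by_cases hn : 1 ≤ n
    · have hpow : 2 ^ (n + 1) = 2 ^ n + 2 ^ n := by ring
      rw [hpow, List.range_add, List.map_append, List.map_map]
      have h1 : (List.range (2 ^ n)).map (fun i => zfill (pyBin i) (n + 1)) =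
          (strs n).map ('0' :: ·) := by
        rw [← ih hn, List.map_map]
        apply List.map_congr_left
        intro i hi
        simp only [List.mem_range] at hi
        simp only [Function.comp_apply]
        exact zfill_step n i hn hi
      have h2 : (List.range (2 ^ n)).map ((fun i => zfill (pyBin i) (n + 1)) ∘ (fun k => 2 ^ n + k)) =
          (strs n).map ('1' :: ·) := by
        rw [← ih hn, List.map_map]
        apply List.map_congr_left
        intro j hj
        simp only [List.mem_range] at hj
        simp only [Function.comp_apply]
        rw [pyBin_msb n j hn hj]
        exact zfill_of_le _ _ (by simp [zfill_len])
      rw [h1, h2]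
      rfl
    · have : n = 0 := by omega
      subst this
      show (List.range 2).map (fun i => zfill (pyBin i) 1) = strs 1
      rw [show (2:Nat) = 0 + 1 + 1 by rfl, List.range_succ, List.range_succ, List.range_zero]
      simp only [List.map_append, List.map_cons, List.map_nil]
      simp [pyBin_zero, pyBin_one, zfill, strs]


theorem foldl_false_all {α : Type} (C : α → Prop) [DecidablePred C] :
    ∀ (l : List α) (v : Bool),
      l.foldl (fun f j => if C j then false else f) v = (v && l.all (fun j => !decide (C j))) := by
  intro l
  induction l with
  | nil => intro v; simp
  | cons x t ih =>
    intro v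
    simp only [List.foldl_cons, List.all_cons, ih]
    by_cases h : C x <;> simp [h]

theorem all_range_noAdj : ∀ (s : List Char),
    (List.range (s.length - 1)).all
      (fun j => !(decide (s.getD j '?' = '1') && decide (s.getD (j + 1) '?' = '1'))) = noAdj s := by
  intro s
  induction s with
  | nil => rfl
  | cons a t ih =>
    cases t with
    | nil => rfl
    | cons b u =>
      rw [show noAdj (a :: b :: u) = (!(a = '1' && b = '1') && noAdj (b :: u)) from rfl, ← ih]
      simp only [List.length_cons, Nat.add_sub_cancel, List.range_succ_eq_map, List.all_cons,
        List.all_map]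
      simp only [List.getD_cons_zero, List.getD_cons_succ]
      rfl

theorem foldl_range_getD {α β : Type} :
    ∀ (xs : List α) (d : α) (f : β → α → β) (c : β),
      (List.range xs.length).foldl (fun a k => f a (xs.getD k d)) c = xs.foldl f c := by
  intro xs
  induction xs with
  | nil => intro d f c; simp
  | cons x t ih =>
    intro d f c
    simp only [List.length_cons, List.range_succ_eq_map, List.foldl_cons, List.getD_cons_zero,
      List.foldl_map, List.getD_cons_succ]
    exact ih d f (f c x)

theorem foldl_step_count : ∀ (s : List Char) (c : Int), (∀ ch ∈ s, ch = '0' ∨ ch = '1') →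
    s.foldl (fun acc ch => if ch = '1' then acc + 1 else if ch = '0' then acc - 1 else acc) c
      = c + 2 * (s.count '1' : Int) - s.length := by
  intro s
  induction s with
  | nil => intro c _; simp
  | cons x t ih =>
    intro c hc
    have hx := hc x (by simp)
    simp only [List.foldl_cons]
    rcases hx with rfl | rfl <;>
      simp only [reduceIte] <;>
      rw [ih _ (fun ch h => hc ch (by simp [h]))] <;>
      simp <;> push_cast <;> ring


-- B's multiplicative loop computes the binomial coefficient exactly
theorem loop_choose : ∀ (m k : Nat), k ≤ m →
    (PySem.List.pyRange 0 (k : Int) 1).foldl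
      (fun c i => PySem.Int.floordiv (c * ((m : Int) - i)) (i + 1)) 1 = (Nat.choose m k : Int) := by
  intro m k
  induction k with
  | zero => intro _; simp
  | succ k ih =>
    intro hk
    have h1 : ((k + 1 : Nat) : Int) = (k : Int) + 1 := by push_cast; ring
    rw [h1, PySem.List.pyRange_one_succ_right (by positivity), List.foldl_append,
      ih (by omega)]
    simp only [List.foldl_cons, List.foldl_nil]
    have hmk : ((m : Int) - (k : Int)) = ((m - k : Nat) : Int) := by
      have : k ≤ m := by omega
      push_cast [this]; ring
    rw [hmk]
    rw [show ((m.choose k : Int) * ((m - k : Nat) : Int)) = ((m.choose k * (m - k) : Nat) : Int) by push_cast; ring]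
    rw [show ((k : Int) + 1) = ((k + 1 : Nat) : Int) by push_cast; ring]
    rw [PySem.Int.floordiv_natCast]
    rw [show m.choose k * (m - k) = m.choose (k+1) * (k+1) by rw [← Nat.choose_succ_right_eq]]
    rw [Nat.mul_div_cancel _ (by omega)]

theorem flag_eq (n : Nat) (s : List Char) (hlen : s.length = n) :
    (PySem.List.pyRange 0 ((n : Int) - 1) 1).foldl
      (fun f j => if PySem.List.pyGetD s j '?' = '1' ∧ PySem.List.pyGetD s (j + 1) '?' = '1'
                  then false else f) true = noAdj s := by
  rw [PySem.List.pyRange_one]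
  rw [show ((n : Int) - 1 - 0).toNat = n - 1 by omega]
  rw [List.foldl_map]
  have hfun : (fun (f : Bool) (k : Nat) =>
      if PySem.List.pyGetD s ((0:Int) + ↑k) '?' = '1' ∧ PySem.List.pyGetD s ((0:Int) + ↑k + 1) '?' = '1'
      then false else f)
      = fun f k => if s.getD k '?' = '1' ∧ s.getD (k + 1) '?' = '1' then false else f := by
    funext f k
    rw [show (0:Int) + (k:Int) = ((k : Nat) : Int) by ring, PySem.List.pyGetD_natCast,
      show ((k:Nat):Int) + 1 = ((k + 1 : Nat) : Int) by push_cast; ring, PySem.List.pyGetD_natCast]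
  rw [hfun, foldl_false_all, Bool.true_and, ← hlen, ← all_range_noAdj s]
  simp only [Bool.decide_and]

theorem now_eq (n : Nat) (s : List Char) (hlen : s.length = n) (hc : ∀ c ∈ s, c = '0' ∨ c = '1') :
    (PySem.List.pyRange 0 ((n : Int) + 1) 1).foldl
      (fun now j => if j = 0 then 0
        else if PySem.List.pyGetD s (j - 1) '?' = '1' then now + 1
        else if PySem.List.pyGetD s (j - 1) '?' = '0' then now - 1 else now) 0
      = 2 * (s.count '1' : Int) - n := by
  rw [PySem.List.pyRange_one_cons (by omega), List.foldl_cons]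
  rw [show (if (0:Int) = 0 then (0:Int) else if PySem.List.pyGetD s ((0:Int) - 1) '?' = '1'
      then (0:Int) + 1 else if PySem.List.pyGetD s ((0:Int) - 1) '?' = '0' then (0:Int) - 1
      else (0:Int)) = (0:Int) by simp]
  rw [show (0 : Int) + 1 = 1 by norm_num]
  rw [PySem.List.pyRange_one, show ((n : Int) + 1 - 1).toNat = n by omega]
  rw [List.foldl_map]
  have hfun : (fun (now : Int) (k : Nat) =>
      if (1 + (k : Int)) = 0 then 0
      else if PySem.List.pyGetD s (1 + (k : Int) - 1) '?' = '1' then now + 1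
      else if PySem.List.pyGetD s (1 + (k : Int) - 1) '?' = '0' then now - 1 else now)
      = fun now k => if s.getD k '?' = '1' then now + 1 else if s.getD k '?' = '0' then now - 1
        else now := by
    funext now k
    rw [if_neg (by omega), show (1 + (k : Int) - 1) = ((k : Nat) : Int) by ring,
      PySem.List.pyGetD_natCast]
  simp only [hfun]
  rw [← hlen]
  have h4 : s.foldl (fun now ch => if ch = '1' then now + 1
      else if ch = '0' then now - 1 else now) 0 = 2 * (s.count '1' : Int) - s.length := by
    rw [foldl_step_count s 0 hc]; omega
  exact (foldl_range_getD s '?' (fun now ch => if ch = '1' then now + 1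
      else if ch = '0' then now - 1 else now) 0).trans h4

theorem A_eq_count (H W K : Int) (n : Nat) (hn : 1 ≤ n) (hW : W = (n : Int) + 1) :
    amidakuji H W K =
      ((strs n).countP
        (fun s => noAdj s && decide (2 * (s.count '1' : Int) - (n : Int) = K - 1)) : Int) := by
  subst hW
  simp only [amidakuji]
  rw [show ((n : Int) + 1 - 1).toNat = n by omega]
  rw [show ((2 : Int) ^ n) = ((2 ^ n : Nat) : Int) by push_cast; ring,
    PySem.List.pyRange_zero_natCast, List.foldl_map]
  simp only [Int.toNat_natCast]
  rw [show (n : Int) + 1 - 2 = (n : Int) - 1 by ring]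
  have hmem : ∀ y ∈ List.range (2 ^ n), zfill (pyBin y) n ∈ strs n := by
    intro y hy
    rw [← map_zfill_pyBin n hn]
    exact List.mem_map_of_mem hy
  have htest : ∀ (x : Int) (y : Nat), y ∈ List.range (2 ^ n) →
      (if (List.foldl (fun f j => if PySem.List.pyGetD (zfill (pyBin y) n) j '?' = '1' ∧
            PySem.List.pyGetD (zfill (pyBin y) n) (j + 1) '?' = '1' then false else f) true
            (PySem.List.pyRange 0 ((n:Int) - 1) 1)) = false then x
       else if (List.foldl (fun now j => if j = 0 then 0
            else if PySem.List.pyGetD (zfill (pyBin y) n) (j - 1) '?' = '1' then now + 1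
            else if PySem.List.pyGetD (zfill (pyBin y) n) (j - 1) '?' = '0' then now - 1 else now) 0
            (PySem.List.pyRange 0 ((n:Int) + 1) 1)) = K - 1 then x + 1 else x)
      = if (noAdj (zfill (pyBin y) n) = true ∧
          2 * ((zfill (pyBin y) n).count '1' : Int) - (n:Int) = K - 1) then x + 1 else x := by
    intro x y hy
    obtain ⟨hlen, hch⟩ := strs_sound n _ (hmem y hy)
    rw [flag_eq n _ hlen, now_eq n _ hlen hch]
    by_cases hA : noAdj (zfill (pyBin y) n) = true <;> simp [hA]
  show (List.foldl (fun x y =>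
      if (List.foldl (fun f j => if PySem.List.pyGetD (zfill (pyBin y) n) j '?' = '1' ∧
            PySem.List.pyGetD (zfill (pyBin y) n) (j + 1) '?' = '1' then false else f) true
            (PySem.List.pyRange 0 ((n:Int) - 1) 1)) = false then x
       else if (List.foldl (fun now j => if j = 0 then 0
            else if PySem.List.pyGetD (zfill (pyBin y) n) (j - 1) '?' = '1' then now + 1
            else if PySem.List.pyGetD (zfill (pyBin y) n) (j - 1) '?' = '0' then now - 1 else now) 0
            (PySem.List.pyRange 0 ((n:Int) + 1) 1)) = K - 1 then x + 1 else x) 0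
      (List.range (2 ^ n))) = _
  rw [PySem.List.foldl_congr_mem _ _ _ 0 htest]
  rw [PySem.List.foldl_ite_add_one
    (fun y => noAdj (zfill (pyBin y) n) = true ∧
      2 * (((zfill (pyBin y) n).count '1' : Int)) - (n : Int) = K - 1) (List.range (2 ^ n)) 0]
  rw [zero_add, ← map_zfill_pyBin n hn, List.countP_map]
  norm_cast
  apply List.countP_congr
  intro y _
  simp [Bool.decide_and]

theorem B_eq_count (H W K : Int) (n : Nat) (hW : W = (n : Int) + 1) :
    ((strs n).countP
        (fun s => noAdj s && decide (2 * (s.count '1' : Int) - (n : Int) = K - 1)) : Int)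
      = amidakuji_alt H W K := by
  subst hW
  simp only [amidakuji_alt]
  by_cases hcase : ((n : Int) + 1 + K - 2 < 0 ∨ PySem.Int.mod ((n : Int) + 1 + K - 2) 2 ≠ 0)
  · rw [if_pos hcase]
    rw [PySem.Int.mod_eq_emod_of_pos (by norm_num)] at hcase
    have hz : (strs n).countP
        (fun s => noAdj s && decide (2 * (s.count '1' : Int) - (n : Int) = K - 1)) = 0 := by
      rw [List.countP_eq_zero]
      intro s _
      simp only [Bool.and_eq_true, decide_eq_true_eq, not_and]
      intro _ h2
      rcases hcase with h | h <;> omega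
    rw [hz]
    rfl
  · rw [if_neg hcase]
    push_neg at hcase
    obtain ⟨h0, h2⟩ := hcase
    rw [PySem.Int.mod_eq_emod_of_pos (by norm_num)] at h2
    have hk : PySem.Int.floordiv ((n : Int) + 1 + K - 2) 2
        = (((((n : Int) + 1 + K - 2) / 2).toNat : Nat) : Int) := by
      rw [PySem.Int.floordiv_eq_ediv_of_pos (by norm_num)]
      omega
    set k₀ : Nat := (((n : Int) + 1 + K - 2) / 2).toNat with hk0
    rw [hk]
    have htk : (n : Int) + 1 + K - 2 = 2 * (k₀ : Int) := by omega
    have hcnt : (strs n).countP (fun s => noAdj s && decide (2 * (s.count '1' : Int) - (n:Int) = K - 1))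
        = cnt n k₀ := by
      unfold cnt
      apply List.countP_congr
      intro s _
      simp only [Bool.and_eq_true, decide_eq_true_eq, beq_iff_eq]
      constructor
      · rintro ⟨ha, hb⟩; exact ⟨ha, by omega⟩
      · rintro ⟨ha, hb⟩; exact ⟨ha, by omega⟩
    rw [hcnt, cnt_closed]
    by_cases hbig : ((k₀ : Int) > (n : Int) + 1 - (k₀ : Int))
    · rw [if_pos hbig, Nat.choose_eq_zero_of_lt (by omega)]
      rfl
    · rw [if_neg hbig]
      have hle : k₀ ≤ n + 1 - k₀ := by omega
      have hm : (n : Int) + 1 - (k₀ : Int) = ((n + 1 - k₀ : Nat) : Int) := by omega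
      rw [hm, loop_choose (n + 1 - k₀) k₀ hle]

-- ===== VERDICT (by name: the statement is the Claim_ definition above) =====
theorem amidakuji_spec : Claim_equal_amidakuji := by
  intro H W K _ hpre
  unfold Spec_amidakuji
  have hn : W = ((W - 1).toNat : Int) + 1 := by
    have := hpre
    unfold Pre_amidakuji at this
    omega
  by_cases h1 : W = 1
  · subst h1
    have e0 : PySem.List.pyRange 0 ((2:Int) ^ ((1:Int) - 1).toNat) 1 = [0] := by decide
    have e1 : PySem.List.pyRange 0 ((1:Int) - 2) 1 = [] := by decide
    have e2 : PySem.List.pyRange 0 (1:Int) 1 = [0] := by decide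
    have hA : amidakuji H 1 K = if (0:Int) = K - 1 then 1 else 0 := by
      simp only [amidakuji, e0, e1, e2, List.foldl_cons, List.foldl_nil]
      norm_num
    rw [hA]
    simp only [amidakuji_alt]
    by_cases hK : K = 1
    · subst hK
      decide
    · rw [if_neg (by omega)]
      by_cases hc : (1 + K - 2 < 0 ∨ PySem.Int.mod (1 + K - 2) 2 ≠ 0)
      · rw [if_pos hc]
      · rw [if_neg hc]
        push_neg at hc
        obtain ⟨hc1, hc2⟩ := hc
        rw [PySem.Int.mod_eq_emod_of_pos (by norm_num)] at hc2
        rw [PySem.Int.floordiv_eq_ediv_of_pos (by norm_num)]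
        rw [if_pos (by omega)]
  · have hge : 1 ≤ (W - 1).toNat := by unfold Pre_amidakuji at hpre; omega
    rw [A_eq_count H W K _ hge hn, B_eq_count H W K _ hn]

@[simp] theorem amidakuji_raises : Claim_raises_amidakuji := by
  unfold Claim_raises_amidakuji
  exact ⟨fun H W K _ h => by simp [Raises_amidakuji] at h; simp [Pre_amidakuji]; omega, by decide⟩
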